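-- pv_equiv track=rewrite | github.com/gjones1911/cs425Project1 | DataManipulation.py | find_col_bad_data
-- ===== SOURCE A (Python) =====
-- def find_col_bad_data(dataarray, badsig):
--     retdic = {}
--     for col in range(len(dataarray[0])):
--             for row in range(len(dataarray)):
--                 if dataarray[row][col] == badsig:
--                     if col in retdic:
--                         retdic[col].append(row)
--                     else:
--                         rowlist = [row]
--                         retdic[col] = rowlist
--     return retdic
-- ===== SOURCE B (Python) =====
-- def find_col_bad_data(dataarray, badsig):
--     ncols = len(dataarray[0])
--     bad = [(r, c) for r, row in enumerate(dataarray)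
--                   for c in range(ncols) if row[c] == badsig]
--     groups = {}
--     for r, c in bad:
--         groups.setdefault(c, []).append(r)
--     return {c: groups[c] for c in sorted(groups)}
-- ===== Notes on version B (the rewrite author's own statement) =====
-- stated objective: alternative
-- what changed: Replaces A's column-outer nested scan that mutates the dict in place with a flat row-major comprehension collecting all (row,col) bad positions, a separate grouping pass with setdefault, and a final rebuild over sorted column keys.
import Mathlib
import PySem

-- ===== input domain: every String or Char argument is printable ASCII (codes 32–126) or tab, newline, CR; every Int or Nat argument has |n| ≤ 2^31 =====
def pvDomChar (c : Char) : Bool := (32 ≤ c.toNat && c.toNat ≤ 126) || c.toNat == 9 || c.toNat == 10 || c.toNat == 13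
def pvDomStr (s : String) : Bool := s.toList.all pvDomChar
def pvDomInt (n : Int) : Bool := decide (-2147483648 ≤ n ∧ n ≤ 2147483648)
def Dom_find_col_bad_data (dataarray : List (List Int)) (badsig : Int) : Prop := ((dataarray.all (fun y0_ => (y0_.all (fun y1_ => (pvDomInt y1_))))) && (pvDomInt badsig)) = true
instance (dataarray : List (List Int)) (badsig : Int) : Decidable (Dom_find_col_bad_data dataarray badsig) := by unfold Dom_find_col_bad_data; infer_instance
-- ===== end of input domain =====

-- B re-decomposes A's column-outer dict-mutating double scan into: one flat row-major
-- comprehension of all bad (row, col) positions, a grouping pass, and a rebuild over the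
-- sorted column keys (objective: alternative decomposition, same asymptotic cost).

-- ===== PORT A =====
-- Literal port of A: col-outer/row-inner loops over index ranges, mutating a dict.
-- Out-of-range indexing (dataarray[0] on [], short rows) raises in Python: excluded by Pre_,
-- here pyGetD supplies a default that Pre_ makes unreachable.
def find_col_bad_data (dataarray : List (List Int)) (badsig : Int) : List (Int × List Int) :=
  ((PySem.List.pyRange 0 ((PySem.List.pyGetD dataarray 0 []).length : Int) 1).foldl
    (fun retdic col =>
      (PySem.List.pyRange 0 (dataarray.length : Int) 1).foldl
        (fun retdic row =>
          if PySem.List.pyGetD (PySem.List.pyGetD dataarray row []) col 0 == badsig then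
            if retdic.contains col then
              retdic.modify col [] (fun l => l ++ [row])
            else
              retdic.insert col [row]
          else retdic)
        retdic)
    (PySem.Dict.empty : PySem.Dict Int (List Int))).items

-- ===== PORT B =====
-- Literal port of Source B: flat bad-position list, grouping fold with setdefault-append
-- (= Dict.modify with default []), then a dict rebuilt over the sorted keys.
def find_col_bad_data_alt (dataarray : List (List Int)) (badsig : Int) : List (Int × List Int) :=
  let ncols : Int := ((PySem.List.pyGetD dataarray 0 []).length : Int)
  let bad : List (Int × Int) :=
    (PySem.List.enumerate dataarray).flatMap (fun p =>
      ((PySem.List.pyRange 0 ncols 1).filter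
        (fun c => PySem.List.pyGetD p.2 c 0 == badsig)).map (fun c => (p.1, c)))
  let groups : PySem.Dict Int (List Int) :=
    bad.foldl (fun d rc => d.modify rc.2 [] (fun l => l ++ [rc.1])) PySem.Dict.empty
  (PySem.List.sorted groups.keys (fun k => k) false).map (fun c => (c, groups.getD c []))

-- ===== PRECONDITION & SPEC =====
-- Pre_ excludes exactly the inputs on which the Python A raises IndexError: an empty
-- dataarray (dataarray[0]) and arrays with a row shorter than row 0 (dataarray[row][col]).
def Pre_find_col_bad_data (dataarray : List (List Int)) (badsig : Int) : Prop :=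
  dataarray ≠ [] ∧ ∀ row ∈ dataarray, (dataarray.headI).length ≤ row.length
instance (dataarray : List (List Int)) (badsig : Int) : Decidable (Pre_find_col_bad_data dataarray badsig) := by unfold Pre_find_col_bad_data; infer_instance

def pvWitness_find_col_bad_data : List (List Int) × Int := ([[1, 2, 0], [3, 1, 1]], 1)

def Spec_find_col_bad_data (dataarray : List (List Int)) (badsig : Int) (out : List (Int × List Int)) : Prop := out = find_col_bad_data_alt dataarray badsig
instance (dataarray : List (List Int)) (badsig : Int) (out : List (Int × List Int)) : Decidable (Spec_find_col_bad_data dataarray badsig out) := by unfold Spec_find_col_bad_data; infer_instance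

-- ===== CLAIM (what is proved, stated in full; the proofs are below) =====
def Claim_equal_find_col_bad_data : Prop := ∀ (dataarray : List (List Int)) (badsig : Int), Dom_find_col_bad_data dataarray badsig → Pre_find_col_bad_data dataarray badsig → Spec_find_col_bad_data dataarray badsig (find_col_bad_data dataarray badsig)

-- ===== LEMMAS AND PROOFS =====

-- the common grouping fold: append each value to the bucket of its key
def pvGrp (L : List (Int × Int)) : PySem.Dict Int (List Int) :=
  L.foldl (fun d p => d.modify p.1 [] (fun l => l ++ [p.2])) PySem.Dict.empty

-- cell access as A performs it
def pvAt (dataarray : List (List Int)) (r c : Int) : Int :=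
  PySem.List.pyGetD (PySem.List.pyGetD dataarray r []) c 0

def pvRowsOf (dataarray : List (List Int)) (badsig c : Int) : List Int :=
  (PySem.List.pyRange 0 (dataarray.length : Int) 1).filter
    (fun r => pvAt dataarray r c == badsig)

def pvBadCols (dataarray : List (List Int)) (badsig : Int) : List Int :=
  (PySem.List.pyRange 0 ((PySem.List.pyGetD dataarray 0 []).length : Int) 1).filter
    (fun c => !(pvRowsOf dataarray badsig c).isEmpty)

-- col-major and row-major flat lists of (key = col, value = row) bad positions
def pvLA (dataarray : List (List Int)) (badsig : Int) : List (Int × Int) :=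
  (PySem.List.pyRange 0 ((PySem.List.pyGetD dataarray 0 []).length : Int) 1).flatMap
    (fun c => (pvRowsOf dataarray badsig c).map (fun r => (c, r)))

def pvLB (dataarray : List (List Int)) (badsig : Int) : List (Int × Int) :=
  (PySem.List.enumerate dataarray).flatMap (fun p =>
    (((PySem.List.pyRange 0 ((PySem.List.pyGetD dataarray 0 []).length : Int) 1).filter
        (fun c => PySem.List.pyGetD p.2 c 0 == badsig)).map (fun c => (c, p.1))))


-- ---- generic helper lemmas about folds, flatMaps and filters ----

theorem pv_foldl_flatMap {α β δ : Type} (l : List α) (g : α → List β) (f : δ → β → δ)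
    (init : δ) :
    (l.flatMap g).foldl f init = l.foldl (fun acc x => (g x).foldl f acc) init := by
  induction l generalizing init with
  | nil => simp
  | cons x t ih => simp [List.flatMap_cons, List.foldl_append, ih]

theorem pv_flatMap_if {α β : Type} (l : List α) (p : α → Bool) (f : α → β) :
    l.flatMap (fun x => if p x then [f x] else []) = (l.filter p).map f := by
  induction l with
  | nil => simp
  | cons a t ih =>
    by_cases h : p a = true <;> simp [h, ih]

theorem pv_flatMap_single {β : Type} (cs : List Int) (g : Int → List β) (c : Int)
    (hnd : cs.Nodup) :
    cs.flatMap (fun c' => if c' = c then g c' else []) = if c ∈ cs then g c else [] := by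
  induction cs with
  | nil => simp
  | cons a t ih =>
    rcases List.nodup_cons.mp hnd with ⟨ha, ht⟩
    by_cases hac : a = c
    · subst hac
      have : t.flatMap (fun c' => if c' = a then g c' else []) = [] := by
        rw [ih ht]; simp [ha]
      simp [this]
    · rw [List.flatMap_cons, if_neg hac, List.nil_append, ih ht]
      by_cases hc : c ∈ t
      · rw [if_pos hc, if_pos (List.mem_cons_of_mem _ hc)]
      · rw [if_neg hc, if_neg (by
          intro hmem
          rcases List.mem_cons.mp hmem with h1 | h2
          · exact hac h1.symm
          · exact hc h2)]

theorem pv_filter_filter_beq (l : List Int) (q : Int → Bool) (c : Int) (hnd : l.Nodup) :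
    (l.filter q).filter (fun x => x == c) = if c ∈ l ∧ q c = true then [c] else [] := by
  induction l with
  | nil => simp
  | cons a t ih =>
    rcases List.nodup_cons.mp hnd with ⟨ha, ht⟩
    by_cases hac : a = c
    · subst hac
      by_cases hq : q a = true
      · have : (t.filter q).filter (fun x => x == a) = [] := by
          rw [ih ht]; simp [ha]
        simp [hq, this]
      · rw [List.filter_cons_of_neg (by simp [hq]), ih ht]
        simp [ha, hq]
    · by_cases hq : q a = true
      · rw [List.filter_cons_of_pos hq, List.filter_cons_of_neg (by simp [hac]), ih ht]
        simp [List.mem_cons, Ne.symm hac]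
      · rw [List.filter_cons_of_neg (by simp [hq]), ih ht]
        simp [List.mem_cons, Ne.symm hac]

-- ---- Set helpers: first-insertion set of a constant-blocks flatMap ----

theorem pv_update_const {α : Type} (l : List α) (s : PySem.Set Int) (c : Int) :
    PySem.Set.update s (l.map (fun _ => c)) =
      if l.isEmpty then s else PySem.Set.add s c := by
  induction l generalizing s with
  | nil => simp [PySem.Set.update]
  | cons a t ih =>
    show PySem.Set.update (PySem.Set.add s c) (t.map (fun _ => c)) = _
    rw [ih]
    by_cases h : t.isEmpty = true
    · simp [h]
    · simp [h]

theorem pv_update_flatMap (cs : List Int) (g : Int → List Int) (s : PySem.Set Int)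
    (hnd : cs.Nodup) (hdis : ∀ c ∈ cs, c ∉ s) :
    PySem.Set.update s (cs.flatMap (fun c => (g c).map (fun _ => c))) =
      s ++ cs.filter (fun c => !(g c).isEmpty) := by
  induction cs generalizing s with
  | nil => simp [PySem.Set.update]
  | cons a t ih =>
    rcases List.nodup_cons.mp hnd with ⟨ha, ht⟩
    rw [List.flatMap_cons]
    show PySem.Set.update s ((g a).map (fun _ => a) ++ _) = _
    have hupd : ∀ (s' : PySem.Set Int) (xs ys : List Int),
        PySem.Set.update s' (xs ++ ys) = PySem.Set.update (PySem.Set.update s' xs) ys := by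
      intro s' xs ys; simp [PySem.Set.update, List.foldl_append]
    rw [hupd, pv_update_const]
    by_cases hg : (g a).isEmpty = true
    · rw [if_pos hg, ih s ht (fun c hc => hdis c (List.mem_cons_of_mem _ hc))]
      simp [hg]
    · rw [if_neg hg]
      have hans : a ∉ s := hdis a List.mem_cons_self
      have hadd : PySem.Set.add s a = s ++ [a] := by
        simp [PySem.Set.add, PySem.Set.contains, hans]
      rw [hadd, ih (s ++ [a]) ht (by
        intro c hc hmem
        rcases List.mem_append.mp hmem with h1 | h2
        · exact hdis c (List.mem_cons_of_mem _ hc) h1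
        · rw [List.mem_singleton] at h2
          rw [h2] at hc
          exact ha hc)]
      simp [hg]

theorem pv_ofList_flatMap (cs : List Int) (g : Int → List Int) (hnd : cs.Nodup) :
    PySem.Set.ofList (cs.flatMap (fun c => (g c).map (fun _ => c))) =
      cs.filter (fun c => !(g c).isEmpty) := by
  have h := pv_update_flatMap cs g [] hnd (by intro c _ h; simp at h)
  have h0 : PySem.Set.ofList (cs.flatMap (fun c => (g c).map (fun _ => c))) =
      PySem.Set.update ([] : PySem.Set Int) (cs.flatMap (fun c => (g c).map (fun _ => c))) := rfl
  rw [h0, h]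
  simp

-- ---- the grouping fold pvGrp: keys, key nodup and bucket contents ----

theorem pv_grp_keys (L : List (Int × Int)) :
    (pvGrp L).keys = PySem.Set.ofList (L.map (fun p => p.1)) := by
  unfold pvGrp
  rw [PySem.Dict.keys_foldl_modify_key L (fun p => p.1) [] (fun _ p => fun l => l ++ [p.2])]
  rw [PySem.Dict.keys_empty]
  rfl

theorem pv_grp_nodup (L : List (Int × Int)) : (pvGrp L).keys.Nodup := by
  unfold pvGrp
  exact PySem.Dict.nodup_keys_foldl_modify_key L (fun p => p.1) []
    (fun _ p => fun l => l ++ [p.2]) PySem.Dict.empty PySem.Dict.nodup_keys_empty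

theorem pv_grp_getD (L : List (Int × Int)) (c : Int) :
    (pvGrp L).getD c [] = (L.filter (fun p => p.1 == c)).map (fun p => p.2) := by
  unfold pvGrp
  rw [PySem.Dict.getD_foldl_modify_append, PySem.Dict.getD_empty]
  simp

-- ---- the two flat bad-position lists in generic transpose form ----

theorem pv_LA_filter (P : Int → Int → Bool) (cs rs : List Int) (c : Int) (hcs : cs.Nodup) :
    ((cs.flatMap (fun c' => (rs.filter (P c')).map (fun r => (c', r)))).filter
        (fun p => p.1 == c)) =
      if c ∈ cs then (rs.filter (P c)).map (fun r => (c, r)) else [] := by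
  rw [List.filter_flatMap]
  have hin : ∀ c' : Int,
      ((rs.filter (P c')).map (fun r => (c', r))).filter (fun p => p.1 == c) =
        if c' = c then (rs.filter (P c')).map (fun r => (c', r)) else [] := by
    intro c'
    by_cases h : c' = c
    · subst h; simp [List.filter_map, Function.comp_def]
    · simp [List.filter_map, Function.comp_def, h]
  calc cs.flatMap (fun c' => ((rs.filter (P c')).map (fun r => (c', r))).filter (fun p => p.1 == c))
      = cs.flatMap (fun c' => if c' = c then (rs.filter (P c')).map (fun r => (c', r)) else []) := by
        exact List.flatMap_congr (fun c' _ => hin c')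
    _ = _ := by
        rw [pv_flatMap_single cs _ c hcs]

theorem pv_LB_filter (P : Int → Int → Bool) (cs rs : List Int) (c : Int) (hcs : cs.Nodup) :
    ((rs.flatMap (fun r => (cs.filter (fun c' => P c' r)).map (fun c' => (c', r)))).filter
        (fun p => p.1 == c)) =
      if c ∈ cs then (rs.filter (P c)).map (fun r => (c, r)) else [] := by
  rw [List.filter_flatMap]
  have hin : ∀ r : Int,
      ((cs.filter (fun c' => P c' r)).map (fun c' => (c', r))).filter (fun p => p.1 == c) =
        if c ∈ cs ∧ P c r = true then [(c, r)] else [] := by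
    intro r
    rw [List.filter_map]
    have : ((cs.filter (fun c' => P c' r)).filter ((fun p : Int × Int => p.1 == c) ∘ fun c' => (c', r)))
        = (cs.filter (fun c' => P c' r)).filter (fun x => x == c) := by
      simp [Function.comp_def]
    rw [this, pv_filter_filter_beq cs (fun c' => P c' r) c hcs]
    by_cases h : c ∈ cs ∧ P c r = true <;> simp [h]
  calc rs.flatMap (fun r => ((cs.filter (fun c' => P c' r)).map (fun c' => (c', r))).filter (fun p => p.1 == c))
      = rs.flatMap (fun r => if c ∈ cs ∧ P c r = true then [(c, r)] else []) := by
        exact List.flatMap_congr (fun r _ => hin r)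
    _ = _ := by
        by_cases h : c ∈ cs
        · rw [if_pos h]
          have : (fun r => if c ∈ cs ∧ P c r = true then [(c, r)] else [])
              = (fun r => if P c r then [(c, r)] else []) := by
            funext r; by_cases hp : P c r = true <;> simp [h, hp]
          rw [this, pv_flatMap_if]
        · rw [if_neg h]
          have : (fun r => if c ∈ cs ∧ P c r = true then [(c, r)] else [])
              = (fun _ => ([] : List (Int × Int))) := by
            funext r; simp [h]
          simp [this]

-- ---- bridging the ports to the generic form ----

theorem pv_enum_eq_map_range (da : List (List Int)) :
    PySem.List.enumerate da 0 =
      (PySem.List.pyRange 0 (da.length : Int) 1).map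
        (fun r => (r, PySem.List.pyGetD da r [])) := by
  apply List.ext_getElem
  · simp [PySem.List.length_enumerate, PySem.List.length_pyRange_one]
  · intro k h1 h2
    have hk : k < da.length := by
      simpa [PySem.List.length_enumerate] using h1
    rw [PySem.List.getElem_enumerate da 0 k h1, List.getElem_map,
      PySem.List.getElem_pyRange_one]
    simp only [zero_add, PySem.List.pyGetD_natCast]
    rw [List.getD_eq_getElem da [] hk]

theorem pv_LB_eq (da : List (List Int)) (bs : Int) :
    pvLB da bs =
      (PySem.List.pyRange 0 (da.length : Int) 1).flatMap
        (fun r => (((PySem.List.pyRange 0 ((PySem.List.pyGetD da 0 []).length : Int) 1).filter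
            (fun c => pvAt da r c == bs)).map (fun c => (c, r)))) := by
  rw [pvLB, pv_enum_eq_map_range, List.flatMap_map]
  rfl

-- ===== the three main steps =====

theorem find_col_bad_data_eq_items (dataarray : List (List Int)) (badsig : Int) :
    find_col_bad_data dataarray badsig = (pvGrp (pvLA dataarray badsig)).items := by
  unfold find_col_bad_data pvGrp pvLA
  congr 1
  rw [pv_foldl_flatMap]
  have hcol : ∀ (col : Int) (d : PySem.Dict Int (List Int)),
      (PySem.List.pyRange 0 (dataarray.length : Int) 1).foldl
        (fun retdic row =>
          if PySem.List.pyGetD (PySem.List.pyGetD dataarray row []) col 0 == badsig then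
            if retdic.contains col then
              retdic.modify col [] (fun l => l ++ [row])
            else
              retdic.insert col [row]
          else retdic) d
      = ((pvRowsOf dataarray badsig col).map (fun r => (col, r))).foldl
          (fun d p => d.modify p.1 [] (fun l => l ++ [p.2])) d := by
    intro col d
    have hstep : (fun (d : PySem.Dict Int (List Int)) (row : Int) =>
          if PySem.List.pyGetD (PySem.List.pyGetD dataarray row []) col 0 == badsig then
            if d.contains col then
              d.modify col [] (fun l => l ++ [row])
            else
              d.insert col [row]
          else d)
        = (fun d row =>
          if (pvAt dataarray row col == badsig) = true then
            d.modify col [] (fun l => l ++ [row]) else d) := by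
      funext d row
      unfold pvAt
      by_cases hb : (PySem.List.pyGetD (PySem.List.pyGetD dataarray row []) col 0 == badsig) = true
      · rw [if_pos hb, if_pos hb]
        by_cases hc : d.contains col = true
        · rw [if_pos hc]
        · rw [if_neg (by simp [hc])]
          show d.insert col [row] = d.insert col ((d.getD col []) ++ [row])
          rw [PySem.Dict.getD_of_not_contains d [] (by simpa using hc)]
          rfl
      · rw [if_neg hb, if_neg hb]
    rw [hstep, PySem.List.foldl_if_eq_foldl_filter, List.foldl_map]
    rfl
  apply PySem.List.foldl_congr_mem
  intro d col _
  exact hcol col d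

theorem alt_eq_sorted (dataarray : List (List Int)) (badsig : Int) :
    find_col_bad_data_alt dataarray badsig =
      (PySem.List.sorted (pvGrp (pvLB dataarray badsig)).keys (fun k => k) false).map
        (fun c => (c, (pvGrp (pvLB dataarray badsig)).getD c [])) := by
  have hgrp : pvGrp (pvLB dataarray badsig) =
      ((PySem.List.enumerate dataarray).flatMap (fun p =>
        ((PySem.List.pyRange 0 ((PySem.List.pyGetD dataarray 0 []).length : Int) 1).filter
          (fun c => PySem.List.pyGetD p.2 c 0 == badsig)).map (fun c => (p.1, c)))).foldl
        (fun d rc => d.modify rc.2 [] (fun l => l ++ [rc.1])) PySem.Dict.empty := by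
    unfold pvGrp pvLB
    have hswap : (PySem.List.enumerate dataarray).flatMap (fun p =>
        ((PySem.List.pyRange 0 ((PySem.List.pyGetD dataarray 0 []).length : Int) 1).filter
          (fun c => PySem.List.pyGetD p.2 c 0 == badsig)).map (fun c => (c, p.1)))
        = ((PySem.List.enumerate dataarray).flatMap (fun p =>
          ((PySem.List.pyRange 0 ((PySem.List.pyGetD dataarray 0 []).length : Int) 1).filter
            (fun c => PySem.List.pyGetD p.2 c 0 == badsig)).map (fun c => (p.1, c)))).map
          (fun q => (q.2, q.1)) := by
      rw [List.map_flatMap]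
      exact List.flatMap_congr (by intro p _; simp [List.map_map, Function.comp_def])
    rw [hswap, List.foldl_map]
  rw [find_col_bad_data_alt, hgrp]

theorem both_canonical (dataarray : List (List Int)) (badsig : Int) :
    (pvGrp (pvLA dataarray badsig)).items =
      (PySem.List.sorted (pvGrp (pvLB dataarray badsig)).keys (fun k => k) false).map
        (fun c => (c, (pvGrp (pvLB dataarray badsig)).getD c [])) := by
  have hcsnd : (PySem.List.pyRange 0 ((PySem.List.pyGetD dataarray 0 []).length : Int) 1).Nodup :=
    PySem.List.nodup_pyRange_one _ _
  -- A's bucket list written in the generic transpose form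
  have hLA : pvLA dataarray badsig =
      (PySem.List.pyRange 0 ((PySem.List.pyGetD dataarray 0 []).length : Int) 1).flatMap
        (fun c => (((PySem.List.pyRange 0 (dataarray.length : Int) 1).filter
          (fun r => pvAt dataarray r c == badsig)).map (fun r => (c, r)))) := rfl
  have hLB := pv_LB_eq dataarray badsig
  -- the increasing list of bad columns
  set bc : List Int :=
    (PySem.List.pyRange 0 ((PySem.List.pyGetD dataarray 0 []).length : Int) 1).filter
      (fun c => !((PySem.List.pyRange 0 (dataarray.length : Int) 1).filter
        (fun r => pvAt dataarray r c == badsig)).isEmpty) with hbc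
  have hbcnodup : bc.Nodup := List.Nodup.filter _ hcsnd
  -- A's keys are exactly bc
  have hkeysA : (pvGrp (pvLA dataarray badsig)).keys = bc := by
    rw [pv_grp_keys, hLA, List.map_flatMap]
    have : (fun (c : Int) => (((PySem.List.pyRange 0 (dataarray.length : Int) 1).filter
          (fun r => pvAt dataarray r c == badsig)).map (fun r => (c, r))).map
          (fun p : Int × Int => p.1))
        = (fun c => ((PySem.List.pyRange 0 (dataarray.length : Int) 1).filter
          (fun r => pvAt dataarray r c == badsig)).map (fun _ => c)) := by
      funext c; simp [List.map_map, Function.comp_def]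
    rw [this, pv_ofList_flatMap _ _ hcsnd, hbc]
  -- B's sorted keys are exactly bc
  have hkeysB : PySem.List.sorted (pvGrp (pvLB dataarray badsig)).keys (fun k => k) false = bc := by
    apply PySem.List.sorted_eq_of_perm_of_pairwise_lt
    · rw [List.perm_ext_iff_of_nodup hbcnodup (pv_grp_nodup _)]
      intro c
      rw [pv_grp_keys, hLB, PySem.Set.mem_ofList]
      have hmapfst : ((PySem.List.pyRange 0 (dataarray.length : Int) 1).flatMap
          (fun r => (((PySem.List.pyRange 0 ((PySem.List.pyGetD dataarray 0 []).length : Int) 1).filter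
            (fun c' => pvAt dataarray r c' == badsig)).map (fun c' => (c', r))))).map
            (fun p : Int × Int => p.1)
          = (PySem.List.pyRange 0 (dataarray.length : Int) 1).flatMap
            (fun r => (PySem.List.pyRange 0 ((PySem.List.pyGetD dataarray 0 []).length : Int) 1).filter
              (fun c' => pvAt dataarray r c' == badsig)) := by
        rw [List.map_flatMap]
        exact List.flatMap_congr (by intro r _; simp [List.map_map, Function.comp_def])
      rw [hmapfst, hbc]
      constructor
      · intro hc
        rcases List.mem_filter.mp hc with ⟨hcs, hne⟩
        rcases hfe : (PySem.List.pyRange 0 (dataarray.length : Int) 1).filter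
            (fun r => pvAt dataarray r c == badsig) with _ | ⟨r, rest⟩
        · rw [hfe] at hne; simp at hne
        · have hr : r ∈ (PySem.List.pyRange 0 (dataarray.length : Int) 1).filter
              (fun r => pvAt dataarray r c == badsig) := by
            rw [hfe]; exact List.mem_cons_self
          rcases List.mem_filter.mp hr with ⟨hrs, hb⟩
          exact List.mem_flatMap.mpr ⟨r, hrs, List.mem_filter.mpr ⟨hcs, hb⟩⟩
      · intro hc
        rcases List.mem_flatMap.mp hc with ⟨r, hrs, hcf⟩
        rcases List.mem_filter.mp hcf with ⟨hcs, hb⟩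
        refine List.mem_filter.mpr ⟨hcs, ?_⟩
        have hr : r ∈ (PySem.List.pyRange 0 (dataarray.length : Int) 1).filter
            (fun r => pvAt dataarray r c == badsig) := List.mem_filter.mpr ⟨hrs, hb⟩
        rcases hfe : (PySem.List.pyRange 0 (dataarray.length : Int) 1).filter
            (fun r => pvAt dataarray r c == badsig) with _ | ⟨x, xs⟩
        · rw [hfe] at hr; simp at hr
        · simp
    · exact List.Pairwise.filter _ (PySem.List.pairwise_lt_pyRange_one _ _)
  -- both buckets agree on every bad column
  have hbuck : ∀ c ∈ bc,
      (pvGrp (pvLA dataarray badsig)).getD c [] = (pvGrp (pvLB dataarray badsig)).getD c [] := by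
    intro c hc
    rw [hbc] at hc
    have hcs : c ∈ (PySem.List.pyRange 0 ((PySem.List.pyGetD dataarray 0 []).length : Int) 1) :=
      (List.mem_filter.mp hc).1
    rw [pv_grp_getD, pv_grp_getD, hLA, hLB,
      pv_LA_filter (fun c r => pvAt dataarray r c == badsig) _ _ c hcsnd,
      pv_LB_filter (fun c r => pvAt dataarray r c == badsig) _ _ c hcsnd]
  -- assemble
  rw [PySem.Dict.items_eq_map_keys _ (pv_grp_nodup _) ([] : List Int), hkeysA, hkeysB]
  exact List.map_congr_left (fun c hc => by rw [hbuck c hc])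

-- ===== VERDICT (by name: the statement is the Claim_ definition above) =====
theorem find_col_bad_data_spec : Claim_equal_find_col_bad_data := by
  intro dataarray badsig _ _
  unfold Spec_find_col_bad_data
  rw [find_col_bad_data_eq_items, alt_eq_sorted, both_canonical]
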